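-- pv_equiv track=rewrite | github.com/manudelp/xlsxworld | server/app/tools/_common.py | normalize_sheet_selection
-- ===== SOURCE A (Python) =====
-- def normalize_sheet_selection(sheets: list[str] | None) -> list[str] | None:
--     if not sheets:
--         return None
--     normalized: list[str] = []
--     for entry in sheets:
--         for part in entry.split(","):
--             value = part.strip()
--             if value:
--                 normalized.append(value)
--     return normalized or None
-- ===== SOURCE B (Python) =====
-- def normalize_sheet_selection(sheets):
--     if not sheets:
--         return None
--     out = []
--     for entry in sheets:
--         buf = []
--         for ch in entry + ",":
--             if ch == ",":
--                 while buf and buf[0].isspace():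
--                     buf.pop(0)
--                 while buf and buf[-1].isspace():
--                     buf.pop()
--                 if buf:
--                     out.append("".join(buf))
--                 buf = []
--             else:
--                 buf.append(ch)
--     return out or None
-- ===== Notes on version B (the rewrite author's own statement) =====
-- stated objective: alternative
-- what changed: Replaces split/strip library calls in nested loops by a single character-level state machine: scan each entry char by char with a buffer, flushing a manually-trimmed token at each comma (sentinel comma appended).
import Mathlib
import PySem

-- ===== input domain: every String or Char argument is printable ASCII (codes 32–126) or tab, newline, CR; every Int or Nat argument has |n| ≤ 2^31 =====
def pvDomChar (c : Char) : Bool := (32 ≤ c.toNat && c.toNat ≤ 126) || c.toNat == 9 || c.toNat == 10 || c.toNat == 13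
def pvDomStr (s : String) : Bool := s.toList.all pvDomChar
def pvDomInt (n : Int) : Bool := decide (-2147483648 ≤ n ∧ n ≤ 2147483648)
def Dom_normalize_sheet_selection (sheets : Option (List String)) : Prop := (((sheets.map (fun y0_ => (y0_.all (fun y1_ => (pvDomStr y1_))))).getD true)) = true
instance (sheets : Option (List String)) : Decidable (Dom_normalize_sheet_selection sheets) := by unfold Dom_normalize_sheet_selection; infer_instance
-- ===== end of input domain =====

-- B replaces A's nested split/strip loops by a character-level state machine (buffer + flush-at-comma
-- with manual pop-trim loops); same return value, same complexity (objective: alternative).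

-- ===== PORT A =====
-- literal transliteration of A: nested loops over entry.split(","), strip, append non-empty; two early Nones
def normalize_sheet_selection (sheets : Option (List String)) : Option (List String) :=
  match sheets with
  | none => none
  | some xs =>
    if xs = [] then none   -- `if not sheets: return None`
    else
      let normalized : List String := xs.foldl (fun acc entry =>
        ((PySem.Str.split? entry ",").getD []).foldl (fun acc part =>
          let value := PySem.Str.strip part
          if value ≠ "" then acc ++ [value] else acc) acc) []
      if normalized = [] then none else some normalized   -- `return normalized or None`

-- ===== PORT B =====
-- flush: Source B's two `while buf and buf[0/-1].isspace(): pop` loops (= dropWhile front / dropWhile on reverse), then append if non-empty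
def pvFlushB (buf : List Char) (out : List String) : List String :=
  let b1 := buf.dropWhile PySem.Chars.isspace
  let b2 := (b1.reverse.dropWhile PySem.Chars.isspace).reverse
  if b2 = [] then out else out ++ [String.ofList b2]

-- the inner `for ch in entry + ","` state machine of Source B
def pvScanB : List Char → List Char → List String → List String
  | [], _, out => out
  | c :: rest, buf, out =>
    if c = ',' then pvScanB rest [] (pvFlushB buf out)
    else pvScanB rest (buf ++ [c]) out

def normalize_sheet_selection_alt (sheets : Option (List String)) : Option (List String) :=
  match sheets with
  | none => none
  | some xs =>
    if xs = [] then none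
    else
      let out : List String := xs.foldl (fun out entry => pvScanB (entry.toList ++ [',']) [] out) []
      if out = [] then none else some out

-- ===== PRECONDITION & SPEC =====
def Spec_normalize_sheet_selection (sheets : Option (List String)) (out : Option (List String)) : Prop := out = normalize_sheet_selection_alt sheets
instance (sheets : Option (List String)) (out : Option (List String)) : Decidable (Spec_normalize_sheet_selection sheets out) := by unfold Spec_normalize_sheet_selection; infer_instance

-- ===== CLAIM (what is proved, stated in full; the proofs are below) =====
def Claim_equal_normalize_sheet_selection : Prop := ∀ (sheets : Option (List String)), Dom_normalize_sheet_selection sheets → Spec_normalize_sheet_selection sheets (normalize_sheet_selection sheets)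

-- ===== LEMMAS AND PROOFS =====

-- what both sides emit for a list of comma-free chunks
def pvEmit (L : List (List Char)) : List String :=
  ((L.map PySem.Chars.strip).filter (fun p => p ≠ [])).map String.ofList

-- PySem's fuel-based comma split agrees with Mathlib's splitOnP.
theorem pv_go_spec (fuel : Nat) (l cur : List Char) (acc : List (List Char))
    (h : l.length ≤ fuel) :
    PySem.Chars.splitOn.go [','] fuel l cur acc
      = acc.reverse ++ (l.splitOnP (fun c => c == ',')).modifyHead (cur.reverse ++ ·) := by
  induction fuel generalizing l cur acc with
  | zero =>
    have : l = [] := List.eq_nil_of_length_eq_zero (Nat.le_zero.mp h)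
    subst this
    simp [PySem.Chars.splitOn.go]
  | succ f ih =>
    cases l with
    | nil => simp [PySem.Chars.splitOn.go]
    | cons c rest =>
      rw [PySem.Chars.splitOn.go]
      simp only [List.isPrefixOf, List.splitOnP_cons]
      by_cases hc : c = ','
      · subst hc
        simp only [beq_self_eq_true, Bool.true_and, if_pos, List.length_cons, List.length_nil,
          List.drop_succ_cons, List.drop_zero]
        rw [ih rest [] (cur.reverse :: acc) (by simpa using h)]
        cases hs : rest.splitOnP (fun c => c == ',') with
        | nil => exact absurd hs (List.splitOnP_ne_nil _ _)
        | cons y ys => simp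
      · have hb : (c == ',') = false := by simp [hc]
        have hb' : (',' == c) = false := by simp [Ne.symm hc]
        simp only [hb', Bool.false_and, Bool.false_eq_true, if_false, hb]
        rw [ih rest (c :: cur) acc (by simpa using Nat.le_of_succ_le_succ h)]
        cases hs : rest.splitOnP (fun c => c == ',') with
        | nil => exact absurd hs (List.splitOnP_ne_nil _ _)
        | cons y ys => simp

theorem pv_splitOn_comma (l : List Char) :
    PySem.Chars.splitOn l [','] = l.splitOnP (fun c => c == ',') := by
  rw [PySem.Chars.splitOn, pv_go_spec _ _ _ _ (Nat.le_succ _)]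
  cases hs : l.splitOnP (fun c => c == ',') with
  | nil => exact absurd hs (List.splitOnP_ne_nil _ _)
  | cons y ys => simp

-- A's inner loop appends the stripped non-empty pieces
theorem pv_inner_loop (parts : List String) (acc : List String) :
    parts.foldl (fun acc part =>
        let value := PySem.Str.strip part
        if value ≠ "" then acc ++ [value] else acc) acc
      = acc ++ (parts.map PySem.Str.strip).filter (fun v => v ≠ "") := by
  induction parts generalizing acc with
  | nil => simp
  | cons p ps ih =>
    rw [List.foldl_cons, ih]
    by_cases hp : PySem.Str.strip p = "" <;>
      simp [hp, List.append_assoc]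

-- A's per-entry result is pvEmit of the comma chunks of the entry
theorem pv_entry_A (s : String) :
    ((((PySem.Str.split? s ",").getD []).map PySem.Str.strip).filter (fun v => v ≠ ""))
      = pvEmit (s.toList.splitOnP (fun c => c == ',')) := by
  have hsplit : (PySem.Str.split? s ",").getD []
      = (s.toList.splitOnP (fun c => c == ',')).map String.ofList := by
    simp [PySem.Str.split?, PySem.Chars.split?, pv_splitOn_comma]
  rw [hsplit, pvEmit]
  have hstrip : ∀ l : List Char,
      PySem.Str.strip (String.ofList l) = String.ofList (PySem.Chars.strip l) := by
    intro l; simp [PySem.Str.strip]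
  rw [List.map_map]
  have hmap : ((s.toList.splitOnP (fun c => c == ',')).map (PySem.Str.strip ∘ String.ofList))
      = ((s.toList.splitOnP (fun c => c == ',')).map (String.ofList ∘ PySem.Chars.strip)) := by
    apply List.map_congr_left; intro l _; simp [Function.comp, hstrip]
  rw [hmap, ← List.map_map]
  generalize (s.toList.splitOnP (fun c => c == ',')).map PySem.Chars.strip = M
  induction M with
  | nil => rfl
  | cons p ps ih =>
    have hnil : (String.ofList p = "") ↔ p = [] := by
      constructor
      · intro hp; simpa using congrArg String.toList hp
      · intro hp; subst hp; rfl
    by_cases h : p = [] <;> simp [hnil, h] <;> simpa using ih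

-- A's outer loop flat-maps the per-entry emissions
theorem pv_outer_loop (xs : List String) (acc : List String) :
    xs.foldl (fun acc entry =>
        ((PySem.Str.split? entry ",").getD []).foldl (fun acc part =>
          let value := PySem.Str.strip part
          if value ≠ "" then acc ++ [value] else acc) acc) acc
      = acc ++ xs.flatMap (fun entry => pvEmit (entry.toList.splitOnP (fun c => c == ','))) := by
  induction xs generalizing acc with
  | nil => simp
  | cons e es ih =>
    rw [List.foldl_cons, ih, pv_inner_loop, pv_entry_A]
    simp [List.append_assoc]

-- flush = emit of the single chunk
theorem pv_flush_emit (buf : List Char) (out : List String) :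
    pvFlushB buf out = out ++ pvEmit [buf] := by
  have hdef : pvFlushB buf out
      = if PySem.Chars.strip buf = [] then out
        else out ++ [String.ofList (PySem.Chars.strip buf)] := rfl
  rw [hdef]
  by_cases h : PySem.Chars.strip buf = [] <;> simp [pvEmit, h]

theorem pv_emit_append (L M : List (List Char)) :
    pvEmit (L ++ M) = pvEmit L ++ pvEmit M := by
  simp [pvEmit]

-- the scanner, run to the sentinel comma, emits exactly the chunks of (buf ++ l)
theorem pv_scan_spec (l : List Char) : ∀ (buf : List Char) (out : List String),
    (∀ c ∈ buf, c ≠ ',') →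
    pvScanB (l ++ [',']) buf out
      = out ++ pvEmit ((buf ++ l).splitOnP (fun c => c == ',')) := by
  induction l with
  | nil =>
    intro buf out h
    have hsingle : buf.splitOnP (fun c => c == ',') = [buf] :=
      List.splitOnP_eq_single _ _ (by intro x hx; simpa using h x hx)
    simp [pvScanB, hsingle, pv_flush_emit]
  | cons c rest ih =>
    intro buf out h
    by_cases hc : c = ','
    · subst hc
      have hsingle : buf.splitOnP (fun c => c == ',') = [buf] :=
        List.splitOnP_eq_single _ _ (by intro x hx; simpa using h x hx)
      rw [List.cons_append, pvScanB, if_pos rfl,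
        ih [] (pvFlushB buf out) (by intro c hc; simp at hc),
        List.splitOnP_append_cons _ _ _ _ (by simp), hsingle, pv_emit_append,
        pv_flush_emit]
      simp [List.append_assoc]
    · rw [List.cons_append, pvScanB, if_neg hc,
        ih (buf ++ [c]) out (by intro x hx
                                rcases List.mem_append.mp hx with h1 | h1
                                · exact h x h1
                                · simp at h1; subst h1; exact hc)]
      simp [List.append_assoc]

-- B's outer loop flat-maps the same per-entry emissions
theorem pv_outer_loop_B (xs : List String) (acc : List String) :
    xs.foldl (fun out entry => pvScanB (entry.toList ++ [',']) [] out) acc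
      = acc ++ xs.flatMap (fun entry => pvEmit (entry.toList.splitOnP (fun c => c == ','))) := by
  induction xs generalizing acc with
  | nil => simp
  | cons e es ih =>
    rw [List.foldl_cons, pv_scan_spec _ [] acc (by intro c hc; simp at hc), ih]
    simp [List.append_assoc]

-- ===== VERDICT (by name: the statement is the Claim_ definition above) =====
theorem normalize_sheet_selection_spec : Claim_equal_normalize_sheet_selection := by
  intro sheets _
  unfold Spec_normalize_sheet_selection normalize_sheet_selection normalize_sheet_selection_alt
  cases sheets with
  | none => rfl
  | some xs =>
    by_cases hxs : xs = []
    · simp [hxs]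
    · simp only [hxs, if_false]
      rw [pv_outer_loop, pv_outer_loop_B]
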